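-- pv_equiv track=rewrite | github.com/cjipro/mil_streamlit | mil/harvester/research_trigger.py | _source_hints_for
-- ===== SOURCE A (Python) =====
-- _SOURCE_HINTS = {
--     "login":     ["DownDetector", "App Store reviews", "Reddit r/UKPersonalFinance", "Twitter/X"],
--     "payment":   ["DownDetector", "App Store reviews", "Google Play reviews", "FT/City AM"],
--     "app":       ["App Store reviews", "Google Play reviews", "DownDetector"],
--     "transfer":  ["App Store reviews", "Google Play reviews", "FT/City AM"],
--     "access":    ["DownDetector", "App Store reviews", "Twitter/X"],
--     "error":     ["DownDetector", "App Store reviews", "Reddit r/UKPersonalFinance"],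
--     "crash":     ["App Store reviews", "Google Play reviews", "DownDetector"],
--     "balance":   ["App Store reviews", "Google Play reviews"],
--     "account":   ["App Store reviews", "DownDetector", "Reddit r/UKPersonalFinance"],
--     "support":   ["App Store reviews", "Google Play reviews", "Trustpilot"],
-- }
--
-- def _source_hints_for(keywords: list[str]) -> list[str]:
--     """Return deduplicated source hints relevant to the given keywords."""
--     seen, hints = set(), []
--     for kw in keywords:
--         for hint in _SOURCE_HINTS.get(kw.lower(), []):
--             if hint not in seen:
--                 hints.append(hint)
--                 seen.add(hint)
--     return hints or ["App Store reviews", "Google Play reviews", "DownDetector"]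
-- ===== SOURCE B (Python) =====
-- _SOURCE_HINTS = {
--     "login":     ["DownDetector", "App Store reviews", "Reddit r/UKPersonalFinance", "Twitter/X"],
--     "payment":   ["DownDetector", "App Store reviews", "Google Play reviews", "FT/City AM"],
--     "app":       ["App Store reviews", "Google Play reviews", "DownDetector"],
--     "transfer":  ["App Store reviews", "Google Play reviews", "FT/City AM"],
--     "access":    ["DownDetector", "App Store reviews", "Twitter/X"],
--     "error":     ["DownDetector", "App Store reviews", "Reddit r/UKPersonalFinance"],
--     "crash":     ["App Store reviews", "Google Play reviews", "DownDetector"],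
--     "balance":   ["App Store reviews", "Google Play reviews"],
--     "account":   ["App Store reviews", "DownDetector", "Reddit r/UKPersonalFinance"],
--     "support":   ["App Store reviews", "Google Play reviews", "Trustpilot"],
-- }
--
-- def _source_hints_for(keywords: list[str]) -> list[str]:
--     """Return deduplicated source hints relevant to the given keywords."""
--     flat = []
--     for kw in keywords:
--         flat += _SOURCE_HINTS.get(kw.lower(), [])
--     if not flat:
--         return ["App Store reviews", "Google Play reviews", "DownDetector"]
--     # first-occurrence order = sort the distinct hints by their first index in flat
--     return sorted(set(flat), key=flat.index)
-- ===== Notes on version B (the rewrite author's own statement) =====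
-- stated objective: alternative
-- what changed: B flattens all keywords' hints into one list and then recovers the output by sorting the SET of distinct hints by their first-occurrence index (sorted(set(flat), key=flat.index)), instead of A's streaming seen-set gather-and-dedup loop.
import Mathlib
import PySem

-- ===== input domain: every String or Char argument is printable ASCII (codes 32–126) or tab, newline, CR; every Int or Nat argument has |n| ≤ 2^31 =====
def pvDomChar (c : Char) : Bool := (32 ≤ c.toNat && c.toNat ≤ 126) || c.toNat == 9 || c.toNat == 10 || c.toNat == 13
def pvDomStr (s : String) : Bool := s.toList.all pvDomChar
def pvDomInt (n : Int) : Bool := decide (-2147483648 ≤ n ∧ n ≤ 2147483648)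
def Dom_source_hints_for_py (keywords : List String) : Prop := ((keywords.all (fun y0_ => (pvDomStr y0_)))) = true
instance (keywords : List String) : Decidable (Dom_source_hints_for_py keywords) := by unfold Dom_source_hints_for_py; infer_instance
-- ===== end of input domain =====

-- B replaces A's streaming seen-set gather-and-dedup loop by flattening all hints and then
-- sorting the set of distinct hints by first-occurrence index; same return value, no speed claim.


-- module-level constant _SOURCE_HINTS, shared by both versions
def sourceHintsTable : PySem.Dict String (List String) := PySem.Dict.mk
  [("login",    ["DownDetector", "App Store reviews", "Reddit r/UKPersonalFinance", "Twitter/X"]),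
   ("payment",  ["DownDetector", "App Store reviews", "Google Play reviews", "FT/City AM"]),
   ("app",      ["App Store reviews", "Google Play reviews", "DownDetector"]),
   ("transfer", ["App Store reviews", "Google Play reviews", "FT/City AM"]),
   ("access",   ["DownDetector", "App Store reviews", "Twitter/X"]),
   ("error",    ["DownDetector", "App Store reviews", "Reddit r/UKPersonalFinance"]),
   ("crash",    ["App Store reviews", "Google Play reviews", "DownDetector"]),
   ("balance",  ["App Store reviews", "Google Play reviews"]),
   ("account",  ["App Store reviews", "DownDetector", "Reddit r/UKPersonalFinance"]),
   ("support",  ["App Store reviews", "Google Play reviews", "Trustpilot"])]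

-- ===== PORT A =====
-- fused loop: state (seen : set, hints : list); append hint and add to seen when unseen
def source_hints_for_py (keywords : List String) : List String :=
  let st : PySem.Set String × List String :=
    keywords.foldl
      (fun st kw =>
        (PySem.Dict.getD sourceHintsTable (PySem.Str.lower kw) []).foldl
          (fun (st : PySem.Set String × List String) hint =>
            if st.1.contains hint then st else (st.1.add hint, st.2 ++ [hint]))
          st)
      (PySem.Set.empty, [])
  if st.2 = [] then ["App Store reviews", "Google Play reviews", "DownDetector"] else st.2

-- ===== PORT B =====
-- flatten, then sorted(set(flat), key=flat.index)
def source_hints_for_py_alt (keywords : List String) : List String :=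
  let flat := keywords.foldl
    (fun acc kw => acc ++ PySem.Dict.getD sourceHintsTable (PySem.Str.lower kw) []) []
  if flat = [] then ["App Store reviews", "Google Play reviews", "DownDetector"]
  else PySem.List.sorted (PySem.Set.ofList flat)
    (fun h => (PySem.List.index? flat h).getD 0) false

-- ===== PRECONDITION & SPEC =====
def Spec_source_hints_for_py (keywords : List String) (out : List String) : Prop := out = source_hints_for_py_alt keywords
instance (keywords : List String) (out : List String) : Decidable (Spec_source_hints_for_py keywords out) := by unfold Spec_source_hints_for_py; infer_instance

-- ===== CLAIM =====
def Claim_equal_source_hints_for_py : Prop := ∀ (keywords : List String), Dom_source_hints_for_py keywords → Spec_source_hints_for_py keywords (source_hints_for_py keywords)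

-- ===== LEMMAS AND PROOFS =====

-- A's state invariant: once seen = hints (as lists), each fused step keeps them equal,
-- and both evolve exactly as PySem.Set.add does.
theorem fused_foldl_eq (xs : List String) (h : List String) :
    xs.foldl
      (fun (st : PySem.Set String × List String) hint =>
        if st.1.contains hint then st else (st.1.add hint, st.2 ++ [hint]))
      (h, h) = (xs.foldl PySem.Set.add h, xs.foldl PySem.Set.add h) := by
  induction xs generalizing h with
  | nil => rfl
  | cons x xs ih =>
    rw [List.foldl_cons, List.foldl_cons]
    by_cases hc : PySem.Set.contains h x = true
    · have h1 : (if ((h, h) : PySem.Set String × List String).1.contains x = true then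
          ((h, h) : PySem.Set String × List String)
          else (PySem.Set.add (h, h).1 x, (h, h).2 ++ [x])) = (h, h) := if_pos hc
      have h2 : PySem.Set.add h x = h := by unfold PySem.Set.add; rw [if_pos hc]
      rw [h1, h2]; exact ih h
    · have h1 : (if ((h, h) : PySem.Set String × List String).1.contains x = true then
          ((h, h) : PySem.Set String × List String)
          else (PySem.Set.add (h, h).1 x, (h, h).2 ++ [x]))
          = ((h ++ [x] : List String), h ++ [x]) := by
        rw [if_neg hc]; unfold PySem.Set.add; rw [if_neg hc]
      have h2 : PySem.Set.add h x = h ++ [x] := by unfold PySem.Set.add; rw [if_neg hc]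
      rw [h1, h2]; exact ih (h ++ [x])

-- A's whole nested loop, with seen = hints, computes the Set.add fold on both components.
theorem outer_foldl_eq (kws : List String) (h : List String) :
    kws.foldl
      (fun st kw =>
        (PySem.Dict.getD sourceHintsTable (PySem.Str.lower kw) []).foldl
          (fun (st : PySem.Set String × List String) hint =>
            if st.1.contains hint then st else (st.1.add hint, st.2 ++ [hint]))
          st)
      (h, h) =
    (kws.foldl (fun acc kw => (PySem.Dict.getD sourceHintsTable (PySem.Str.lower kw) []).foldl PySem.Set.add acc) h,
     kws.foldl (fun acc kw => (PySem.Dict.getD sourceHintsTable (PySem.Str.lower kw) []).foldl PySem.Set.add acc) h) := by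
  induction kws generalizing h with
  | nil => rfl
  | cons kw kws ih =>
    rw [List.foldl_cons, List.foldl_cons, fused_foldl_eq]
    exact ih _

-- first-occurrence indices strictly increase along ofList l
theorem pairwise_index_ofList (l : List String) :
    (PySem.Set.ofList l).Pairwise
      (fun a b => (PySem.List.index? l a).getD 0 < (PySem.List.index? l b).getD 0) := by
  induction l with
  | nil => simp [PySem.Set.ofList]
  | cons x xs ih =>
    rw [PySem.Set.ofList_cons]
    refine List.Pairwise.cons ?_ ?_
    · intro b hb
      have hb' := (PySem.Set.mem_discard _ _ _).mp hb
      have hbx : x ≠ b := fun h => hb'.2 h.symm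
      rw [PySem.List.index?_cons_self, PySem.List.index?_cons_of_ne xs hbx]
      have hbmem : b ∈ xs := (PySem.Set.mem_ofList _ _).mp hb'.1
      obtain ⟨k, hk⟩ := Option.isSome_iff_exists.mp
        ((PySem.List.index?_isSome_iff xs b).mpr hbmem)
      rw [PySem.List.index?_eq_idxOf?] at hk
      simp [hk]
    · have hsub : (PySem.Set.discard (PySem.Set.ofList xs) x).Sublist (PySem.Set.ofList xs) := by
        unfold PySem.Set.discard
        exact List.filter_sublist
      refine List.Pairwise.imp_of_mem ?_ (List.Pairwise.sublist hsub ih)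
      intro a b ha hb hab
      have ha' := (PySem.Set.mem_discard _ _ _).mp ha
      have hb' := (PySem.Set.mem_discard _ _ _).mp hb
      have hxa : x ≠ a := fun h => ha'.2 h.symm
      have hxb : x ≠ b := fun h => hb'.2 h.symm
      rw [PySem.List.index?_cons_of_ne xs hxa, PySem.List.index?_cons_of_ne xs hxb]
      obtain ⟨ka, hka⟩ := Option.isSome_iff_exists.mp
        ((PySem.List.index?_isSome_iff xs a).mpr ((PySem.Set.mem_ofList _ _).mp ha'.1))
      obtain ⟨kb, hkb⟩ := Option.isSome_iff_exists.mp
        ((PySem.List.index?_isSome_iff xs b).mpr ((PySem.Set.mem_ofList _ _).mp hb'.1))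
      rw [PySem.List.index?_eq_idxOf?] at hka hkb
      simp [hka, hkb] at hab ⊢
      omega

-- sorting the distinct hints by first index reproduces first-occurrence order
theorem sorted_ofList_by_index (l : List String) :
    PySem.List.sorted (PySem.Set.ofList l)
      (fun h => (PySem.List.index? l h).getD 0) false = PySem.Set.ofList l :=
  PySem.List.sorted_eq_of_perm_of_pairwise_lt _ _ _ (List.Perm.refl _) (pairwise_index_ofList l)

-- ===== VERDICT =====
theorem source_hints_for_py_spec : Claim_equal_source_hints_for_py := by
  intro keywords _
  unfold Spec_source_hints_for_py source_hints_for_py source_hints_for_py_alt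
  rw [PySem.List.foldl_append_eq_flatMap, List.nil_append]
  set flat := keywords.flatMap (fun kw => PySem.Dict.getD sourceHintsTable (PySem.Str.lower kw) []) with hflat
  have hA : keywords.foldl
      (fun st kw =>
        (PySem.Dict.getD sourceHintsTable (PySem.Str.lower kw) []).foldl
          (fun (st : PySem.Set String × List String) hint =>
            if st.1.contains hint then st else (st.1.add hint, st.2 ++ [hint]))
          st)
      (PySem.Set.empty, []) = (PySem.Set.ofList flat, PySem.Set.ofList flat) := by
    rw [show ((PySem.Set.empty : PySem.Set String), ([] : List String)) = (([] : List String), ([] : List String)) from rfl,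
        outer_foldl_eq keywords []]
    rw [PySem.Set.ofList_eq_foldl, hflat, List.foldl_flatMap]
  simp only [hA]
  rw [sorted_ofList_by_index]
  by_cases hnil : flat = []
  · simp [hnil, PySem.Set.ofList]
  · have h1 : PySem.Set.ofList flat ≠ [] := by
      obtain ⟨y, ys, hys⟩ := List.exists_cons_of_ne_nil hnil
      rw [hys, PySem.Set.ofList_cons]; exact List.cons_ne_nil _ _
    rw [if_neg h1, if_neg hnil]
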